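-- pv_equiv track=rewrite | github.com/kleberandrade/report-python-docx | beta_report_send_email.py | convert_itens_to_sequential_text
-- ===== SOURCE A (Python) =====
-- def convert_itens_to_sequential_text(itens_values, itens_legends):
--     text = ''
--     for i in range(len(itens_values)):
--         text = text + '{0}% ({1})'.format(itens_values[i], itens_legends[i].replace('\\',''))
--         if i < len(itens_values) - 2:
--             text = text + ', '
--         elif i < len(itens_values) - 1:
--             text = text + ' e '
--
--     return text
-- ===== SOURCE B (Python) =====
-- def convert_itens_to_sequential_text(itens_values, itens_legends):
--     parts = ['{0}% ({1})'.format(itens_values[i], itens_legends[i].replace('\\', ''))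
--              for i in range(len(itens_values))]
--     if not parts:
--         return ''
--     if len(parts) == 1:
--         return parts[0]
--     return ', '.join(parts[:-1]) + ' e ' + parts[-1]
-- ===== Notes on version B (the rewrite author's own statement) =====
-- stated objective: idiomatic
-- what changed: B separates formatting from joining: it builds the list of formatted parts by a comprehension, then returns '' / the single part / ', '.join(parts[:-1]) + ' e ' + parts[-1], instead of A's single index loop that appends and picks the separator inline by comparing i with len-2 and len-1.
import Mathlib
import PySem

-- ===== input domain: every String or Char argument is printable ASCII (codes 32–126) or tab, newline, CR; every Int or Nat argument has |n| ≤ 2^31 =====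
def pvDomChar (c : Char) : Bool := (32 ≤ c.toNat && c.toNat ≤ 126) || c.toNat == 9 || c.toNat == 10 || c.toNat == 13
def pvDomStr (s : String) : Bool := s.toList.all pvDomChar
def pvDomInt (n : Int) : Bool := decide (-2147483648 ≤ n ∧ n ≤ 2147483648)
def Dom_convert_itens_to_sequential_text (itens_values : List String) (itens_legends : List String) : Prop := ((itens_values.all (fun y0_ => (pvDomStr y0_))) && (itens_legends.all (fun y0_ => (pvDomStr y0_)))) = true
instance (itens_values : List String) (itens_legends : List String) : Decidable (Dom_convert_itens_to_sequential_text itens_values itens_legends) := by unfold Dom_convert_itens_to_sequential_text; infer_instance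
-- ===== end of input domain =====

-- ===== PORT A =====
-- A: one index loop; the separator after each item is chosen by comparing i with len-2 / len-1.
def convert_itens_to_sequential_text (itens_values : List String) (itens_legends : List String) : String :=
  (PySem.List.pyRange 0 itens_values.length 1).foldl
    (fun text i =>
      let t := text ++ PySem.List.pyGetD itens_values i "" ++ "% (" ++
        PySem.Str.replace (PySem.List.pyGetD itens_legends i "") "\\" "" ++ ")"
      if i < (itens_values.length : Int) - 2 then t ++ ", "
      else if i < (itens_values.length : Int) - 1 then t ++ " e "
      else t) ""

-- ===== PORT B =====
-- B: build the formatted parts first, then join all but the last with ", " and attach the last with " e ".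
def convert_itens_to_sequential_text_alt (itens_values : List String) (itens_legends : List String) : String :=
  let parts := (PySem.List.pyRange 0 itens_values.length 1).map
    (fun i => PySem.List.pyGetD itens_values i "" ++ "% (" ++
      PySem.Str.replace (PySem.List.pyGetD itens_legends i "") "\\" "" ++ ")")
  if parts.isEmpty then ""
  else if parts.length == 1 then PySem.List.pyGetD parts 0 ""
  else PySem.Str.join ", " (PySem.List.slice parts none (some (-1))) ++ " e " ++
    PySem.List.pyGetD parts (-1) ""

-- ===== PRECONDITION & SPEC =====
-- Pre_ excludes exactly the inputs where the Python raises IndexError: both A and B index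
-- itens_legends[i] for every i < len(itens_values), so legends must be at least as long.
def Pre_convert_itens_to_sequential_text (itens_values : List String) (itens_legends : List String) : Prop :=
  itens_values.length ≤ itens_legends.length
instance (itens_values : List String) (itens_legends : List String) : Decidable (Pre_convert_itens_to_sequential_text itens_values itens_legends) := by unfold Pre_convert_itens_to_sequential_text; infer_instance

def pvWitness_convert_itens_to_sequential_text : List String × List String :=
  (["10", "25"], ["Sim", "Nao"])

def Spec_convert_itens_to_sequential_text (itens_values : List String) (itens_legends : List String) (out : String) : Prop := out = convert_itens_to_sequential_text_alt itens_values itens_legends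
instance (itens_values : List String) (itens_legends : List String) (out : String) : Decidable (Spec_convert_itens_to_sequential_text itens_values itens_legends out) := by unfold Spec_convert_itens_to_sequential_text; infer_instance

-- ===== CLAIM (what is proved, stated in full; the proofs are below) =====
def Claim_equal_convert_itens_to_sequential_text : Prop := ∀ (itens_values : List String) (itens_legends : List String), Dom_convert_itens_to_sequential_text itens_values itens_legends → Pre_convert_itens_to_sequential_text itens_values itens_legends → Spec_convert_itens_to_sequential_text itens_values itens_legends (convert_itens_to_sequential_text itens_values itens_legends)

-- ===== LEMMAS AND PROOFS =====

-- recursive Oxford join (proof intermediary between A's fold and B's join/slice form)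
def pvOxfordJoin : List String → String
  | [] => ""
  | [p] => p
  | [p, q] => p ++ " e " ++ q
  | p :: q :: r :: rest => p ++ ", " ++ pvOxfordJoin (q :: r :: rest)

-- plain concatenation of a list of strings (proof helper)
def pvConcat : List String → String
  | [] => ""
  | s :: r => s ++ pvConcat r

-- a fold that only appends distributes over the start accumulator
theorem pv_concat_acc (H : Int → String) : ∀ (l : List Int) (a : String),
    l.foldl (fun t i => t ++ H i) a = a ++ pvConcat (l.map H) := by
  intro l
  induction l with
  | nil => intro a; simp [pvConcat]
  | cons x xs ih =>
    intro a
    simp only [List.foldl_cons, List.map_cons, pvConcat]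
    rw [ih (a ++ H x), String.append_assoc]

-- the separator appended to item i, as a function of i alone
def pvSep (N : Int) (i : Int) : String :=
  if i < N - 2 then ", " else if i < N - 1 then " e " else ""

-- core lemma: the concatenation of "part ++ separator" pieces is the recursive Oxford join
theorem pv_concat_eq_oxford (N : Nat) : ∀ f : Int → String,
    pvConcat ((PySem.List.pyRange 0 N 1).map (fun i => f i ++ pvSep (N : Int) i))
      = pvOxfordJoin ((PySem.List.pyRange 0 N 1).map f) := by
  induction N with
  | zero =>
    intro f
    have h0 : PySem.List.pyRange 0 ((0 : Nat) : Int) 1 = [] := by decide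
    rw [h0]; rfl
  | succ n ih =>
    intro f
    match n, ih with
    | 0, _ =>
      have h1 : PySem.List.pyRange 0 ((0 + 1 : Nat) : Int) 1 = [0] := by decide
      rw [h1]
      simp only [List.map_cons, List.map_nil, pvConcat, pvOxfordJoin]
      have hs : pvSep ((0 + 1 : Nat) : Int) 0 = "" := by decide
      rw [hs, String.append_empty, String.append_empty]
    | 1, _ =>
      have h2 : PySem.List.pyRange 0 ((1 + 1 : Nat) : Int) 1 = [0, 1] := by decide
      rw [h2]
      simp only [List.map_cons, List.map_nil, pvConcat, pvOxfordJoin]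
      have hs0 : pvSep ((1 + 1 : Nat) : Int) 0 = " e " := by decide
      have hs1 : pvSep ((1 + 1 : Nat) : Int) 1 = "" := by decide
      rw [hs0, hs1, String.append_empty, String.append_empty, String.append_assoc]
    | (m + 2), ih =>
      have hN : (0 : Int) < ((m + 2 + 1 : Nat) : Int) := by push_cast; omega
      rw [PySem.List.pyRange_one_cons hN]
      simp only [List.map_cons, pvConcat, zero_add]
      have hs0 : pvSep ((m + 2 + 1 : Nat) : Int) 0 = ", " := by
        unfold pvSep; rw [if_pos (by push_cast; omega)]
      rw [hs0]
      -- shift the tail range down by one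
      have hshift : PySem.List.pyRange 1 ((m + 2 + 1 : Nat) : Int) 1
          = (PySem.List.pyRange 0 ((m + 2 : Nat) : Int) 1).map (fun k => k + 1) := by
        rw [PySem.List.pyRange_one 1, PySem.List.pyRange_one 0, List.map_map]
        have he : (((m + 2 + 1 : Nat) : Int) - 1).toNat = (((m + 2 : Nat) : Int) - 0).toNat := by
          push_cast; omega
        rw [he]
        apply List.map_congr_left
        intro k _
        simp [Function.comp]; ring
      rw [hshift, List.map_map, List.map_map]
      -- the shifted separator-tagged parts are the (m+2)-parts of the shifted function
      have hfun : ((fun i => f i ++ pvSep ((m + 2 + 1 : Nat) : Int) i) ∘ fun k => k + 1)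
          = (fun i => (fun j => f (j + 1)) i ++ pvSep ((m + 2 : Nat) : Int) i) := by
        funext k
        simp only [Function.comp, pvSep]
        have c1 : (k + 1 < ((m + 2 + 1 : Nat) : Int) - 2) ↔ (k < ((m + 2 : Nat) : Int) - 2) := by
          push_cast; omega
        have c2 : (k + 1 < ((m + 2 + 1 : Nat) : Int) - 1) ↔ (k < ((m + 2 : Nat) : Int) - 1) := by
          push_cast; omega
        simp only [c1, c2]
      rw [hfun, ih (fun j => f (j + 1))]
      -- the tail part list has at least two elements, so pvOxfordJoin takes its cons branch
      have hlen : 2 ≤ ((PySem.List.pyRange 0 ((m + 2 : Nat) : Int) 1).map (fun j => f (j + 1))).length := by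
        rw [List.length_map, PySem.List.length_pyRange_one]; push_cast; omega
      rcases hl : (PySem.List.pyRange 0 ((m + 2 : Nat) : Int) 1).map (fun j => f (j + 1)) with
        _ | ⟨a, _ | ⟨b, rest⟩⟩
      · rw [hl] at hlen; simp at hlen
      · rw [hl] at hlen; simp at hlen
      · have hl' : (PySem.List.pyRange 0 ((m + 2 : Nat) : Int) 1).map (f ∘ fun k => k + 1)
            = a :: b :: rest := hl
        rw [hl', pvOxfordJoin]

-- A's fold (for an arbitrary step that appends part-plus-separator) equals the Oxford join
theorem pv_fold_eq_oxford (N : Nat) (f : Int → String) (g : String → Int → String)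
    (hg : ∀ (acc : String), ∀ i ∈ PySem.List.pyRange 0 (N : Int) 1,
      g acc i = acc ++ (f i ++ pvSep (N : Int) i)) :
    (PySem.List.pyRange 0 (N : Int) 1).foldl g ""
      = pvOxfordJoin ((PySem.List.pyRange 0 (N : Int) 1).map f) := by
  rw [PySem.List.foldl_congr_mem _ _ (fun t i => t ++ (f i ++ pvSep (N : Int) i)) _ hg,
    pv_concat_acc, String.empty_append]
  exact pv_concat_eq_oxford N f

-- sep.join lemmas lifted to PySem.Str.join
theorem pv_str_join_singleton (sep p : String) : PySem.Str.join sep [p] = p := by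
  rw [← String.toList_inj]
  simp [PySem.Chars.join_singleton]

theorem pv_str_join_cons_cons (sep p q : String) (rest : List String) :
    PySem.Str.join sep (p :: q :: rest) = p ++ sep ++ PySem.Str.join sep (q :: rest) := by
  rw [← String.toList_inj]
  simp [PySem.Chars.join_cons_cons]

-- join-all-but-last plus " e " plus last equals the recursive Oxford join (two or more parts)
theorem pv_join_dropLast (rest : List String) : ∀ (p q : String),
    PySem.Str.join ", " ((p :: q :: rest).dropLast) ++ " e " ++
        PySem.List.pyGetD (p :: q :: rest) (-1) ""
      = pvOxfordJoin (p :: q :: rest) := by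
  induction rest with
  | nil =>
    intro p q
    have h2 : PySem.List.pyGetD [p, q] (-1) "" = q := by
      simp [PySem.List.pyGetD, PySem.List.pyGet?, PySem.List.pyIdx?]
    rw [show (([p, q] : List String)).dropLast = [p] from rfl, pv_str_join_singleton, h2]
    rfl
  | cons r rs ih =>
    intro p q
    have h2 : PySem.List.pyGetD (p :: q :: r :: rs) (-1) ""
        = PySem.List.pyGetD (q :: r :: rs) (-1) "" := by
      rw [PySem.List.pyGetD_neg_one (p :: q :: r :: rs) "" (by simp),
        PySem.List.pyGetD_neg_one (q :: r :: rs) "" (by simp),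
        List.getLast_cons (by simp)]
    rw [show (p :: q :: r :: rs).dropLast = p :: q :: (r :: rs).dropLast from rfl,
      pv_str_join_cons_cons, h2, pvOxfordJoin, ← ih q r]
    simp [String.append_assoc]

-- B's if-chain over any parts list equals the recursive Oxford join
theorem pv_alt_eq_oxford (parts : List String) :
    (if parts.isEmpty then ""
     else if parts.length == 1 then PySem.List.pyGetD parts 0 ""
     else PySem.Str.join ", " (PySem.List.slice parts none (some (-1))) ++ " e " ++
       PySem.List.pyGetD parts (-1) "")
    = pvOxfordJoin parts := by
  match parts with
  | [] => rfl
  | [p] => rfl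
  | p :: q :: rest =>
    rw [if_neg (by simp), if_neg (by simp), PySem.List.slice_to_neg_one]
    exact pv_join_dropLast rest p q

-- ===== VERDICT (by name: the statement is the Claim_ definition above) =====
theorem convert_itens_to_sequential_text_spec : Claim_equal_convert_itens_to_sequential_text := by
  intro itens_values itens_legends _ _
  unfold Spec_convert_itens_to_sequential_text
  unfold convert_itens_to_sequential_text convert_itens_to_sequential_text_alt
  rw [pv_alt_eq_oxford]
  apply pv_fold_eq_oxford itens_values.length
    (fun i => PySem.List.pyGetD itens_values i "" ++ "% (" ++
      PySem.Str.replace (PySem.List.pyGetD itens_legends i "") "\\" "" ++ ")")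
  intro acc i _
  simp only [pvSep]
  split_ifs <;> simp [String.append_assoc, String.append_empty]
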